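-- pv_equiv track=rewrite | github.com/shishamt-github/englishrevisionquiz | app.py | get_chapter_info
-- ===== SOURCE A (Python) =====
-- FIRST_FLIGHT_CHAPTERS = {
--     "prose": [
--         {"id": "ff_p1", "name": "A Letter to God", "type": "prose"},
--         {"id": "ff_p2", "name": "Nelson Mandela: Long Walk to Freedom", "type": "prose"},
--         {"id": "ff_p3", "name": "Two Stories about Flying", "type": "prose"},
--         {"id": "ff_p4", "name": "From the Diary of Anne Frank", "type": "prose"},
--         {"id": "ff_p5", "name": "Glimpses of India", "type": "prose"},
--         {"id": "ff_p6", "name": "Mijbil the Otter", "type": "prose"},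
--         {"id": "ff_p7", "name": "Madam Rides the Bus", "type": "prose"},
--         {"id": "ff_p8", "name": "The Sermon at Benares", "type": "prose"},
--         {"id": "ff_p9", "name": "The Proposal", "type": "prose"},
--     ],
--     "poetry": [
--         {"id": "ff_po1", "name": "Dust of Snow & Fire and Ice", "type": "poetry"},
--         {"id": "ff_po2", "name": "A Tiger in the Zoo", "type": "poetry"},
--         {"id": "ff_po3", "name": "How to Tell Wild Animals & The Ball Poem", "type": "poetry"},
--         {"id": "ff_po4", "name": "Amanda!", "type": "poetry"},
--         {"id": "ff_po5", "name": "Animals & The Trees", "type": "poetry"},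
--         {"id": "ff_po6", "name": "Fog & The Tale of Custard the Dragon", "type": "poetry"},
--         {"id": "ff_po7", "name": "For Anne Gregory", "type": "poetry"},
--     ]
-- }
--
-- FOOTPRINTS_CHAPTERS = [
--     {"id": "fp_1", "name": "A Triumph of Surgery", "type": "story"},
--     {"id": "fp_2", "name": "The Thief's Story", "type": "story"},
--     {"id": "fp_3", "name": "The Midnight Visitor", "type": "story"},
--     {"id": "fp_4", "name": "A Question of Trust", "type": "story"},
--     {"id": "fp_5", "name": "Footprints Without Feet", "type": "story"},
--     {"id": "fp_6", "name": "The Making of a Scientist", "type": "story"},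
--     {"id": "fp_7", "name": "The Necklace", "type": "story"},
--     {"id": "fp_8", "name": "The Hack Driver", "type": "story"},
--     {"id": "fp_9", "name": "Bholi", "type": "story"},
--     {"id": "fp_10", "name": "The Book That Saved the Earth", "type": "story"},
-- ]
--
-- def get_chapter_info(chapter_id):
--     """Get chapter details by ID"""
--     for ch in FIRST_FLIGHT_CHAPTERS["prose"]:
--         if ch["id"] == chapter_id:
--             return {**ch, "book": "First Flight"}
--     for ch in FIRST_FLIGHT_CHAPTERS["poetry"]:
--         if ch["id"] == chapter_id:
--             return {**ch, "book": "First Flight"}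
--     for ch in FOOTPRINTS_CHAPTERS:
--         if ch["id"] == chapter_id:
--             return {**ch, "book": "Footprints Without Feet"}
--     return None
-- ===== SOURCE B (Python) =====
-- # B decodes the structured chapter id (family prefix + 1-based number) instead of
-- # scanning dict lists: names are stored per family and the index comes from the id.
-- _FAMILIES = (
--     ("ff_po", "poetry", "First Flight",
--      ["Dust of Snow & Fire and Ice", "A Tiger in the Zoo",
--       "How to Tell Wild Animals & The Ball Poem", "Amanda!",
--       "Animals & The Trees", "Fog & The Tale of Custard the Dragon",
--       "For Anne Gregory"]),
--     ("ff_p", "prose", "First Flight",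
--      ["A Letter to God", "Nelson Mandela: Long Walk to Freedom",
--       "Two Stories about Flying", "From the Diary of Anne Frank",
--       "Glimpses of India", "Mijbil the Otter", "Madam Rides the Bus",
--       "The Sermon at Benares", "The Proposal"]),
--     ("fp_", "story", "Footprints Without Feet",
--      ["A Triumph of Surgery", "The Thief's Story", "The Midnight Visitor",
--       "A Question of Trust", "Footprints Without Feet",
--       "The Making of a Scientist", "The Necklace", "The Hack Driver",
--       "Bholi", "The Book That Saved the Earth"]),
-- )
--
--
-- def get_chapter_info(chapter_id):
--     """Get chapter details by ID"""
--     for prefix, typ, book, names in _FAMILIES: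
--         if chapter_id.startswith(prefix):
--             suffix = chapter_id[len(prefix):]
--             for i, name in enumerate(names):
--                 if suffix == str(i + 1):
--                     return {"id": chapter_id, "name": name, "type": typ, "book": book}
--     return None
-- ===== Notes on version B (the rewrite author's own statement) =====
-- stated objective: alternative
-- what changed: B decodes the structured chapter id itself (family prefix ff_po/ff_p/fp_ plus a 1-based number indexing a per-family name list) and assembles the result dict from the decoded fields, instead of A's three sequential linear scans over lists of chapter dicts.
import Mathlib
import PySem

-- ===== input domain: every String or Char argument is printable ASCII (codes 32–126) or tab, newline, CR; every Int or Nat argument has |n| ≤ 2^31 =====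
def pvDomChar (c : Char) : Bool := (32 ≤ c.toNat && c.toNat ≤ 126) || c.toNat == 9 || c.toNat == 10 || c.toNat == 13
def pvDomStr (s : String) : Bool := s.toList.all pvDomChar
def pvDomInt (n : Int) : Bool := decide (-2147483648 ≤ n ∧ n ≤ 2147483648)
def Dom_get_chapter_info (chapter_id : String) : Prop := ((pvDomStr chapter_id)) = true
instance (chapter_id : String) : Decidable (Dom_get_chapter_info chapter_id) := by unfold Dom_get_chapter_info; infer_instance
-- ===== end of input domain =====

-- B replaces A's three scans over dict lists by decoding the structured id (family prefix + 1-based number into a per-family name list); objective: alternative/simpler.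

-- ===== PORT A =====
-- the module-level chapter data, as association lists in insertion order
def pvProse : List (List (String × String)) := [
  [("id", "ff_p1"), ("name", "A Letter to God"), ("type", "prose")],
  [("id", "ff_p2"), ("name", "Nelson Mandela: Long Walk to Freedom"), ("type", "prose")],
  [("id", "ff_p3"), ("name", "Two Stories about Flying"), ("type", "prose")],
  [("id", "ff_p4"), ("name", "From the Diary of Anne Frank"), ("type", "prose")],
  [("id", "ff_p5"), ("name", "Glimpses of India"), ("type", "prose")],
  [("id", "ff_p6"), ("name", "Mijbil the Otter"), ("type", "prose")],
  [("id", "ff_p7"), ("name", "Madam Rides the Bus"), ("type", "prose")],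
  [("id", "ff_p8"), ("name", "The Sermon at Benares"), ("type", "prose")],
  [("id", "ff_p9"), ("name", "The Proposal"), ("type", "prose")]]

def pvPoetry : List (List (String × String)) := [
  [("id", "ff_po1"), ("name", "Dust of Snow & Fire and Ice"), ("type", "poetry")],
  [("id", "ff_po2"), ("name", "A Tiger in the Zoo"), ("type", "poetry")],
  [("id", "ff_po3"), ("name", "How to Tell Wild Animals & The Ball Poem"), ("type", "poetry")],
  [("id", "ff_po4"), ("name", "Amanda!"), ("type", "poetry")],
  [("id", "ff_po5"), ("name", "Animals & The Trees"), ("type", "poetry")],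
  [("id", "ff_po6"), ("name", "Fog & The Tale of Custard the Dragon"), ("type", "poetry")],
  [("id", "ff_po7"), ("name", "For Anne Gregory"), ("type", "poetry")]]

def pvFootprints : List (List (String × String)) := [
  [("id", "fp_1"), ("name", "A Triumph of Surgery"), ("type", "story")],
  [("id", "fp_2"), ("name", "The Thief's Story"), ("type", "story")],
  [("id", "fp_3"), ("name", "The Midnight Visitor"), ("type", "story")],
  [("id", "fp_4"), ("name", "A Question of Trust"), ("type", "story")],
  [("id", "fp_5"), ("name", "Footprints Without Feet"), ("type", "story")],
  [("id", "fp_6"), ("name", "The Making of a Scientist"), ("type", "story")],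
  [("id", "fp_7"), ("name", "The Necklace"), ("type", "story")],
  [("id", "fp_8"), ("name", "The Hack Driver"), ("type", "story")],
  [("id", "fp_9"), ("name", "Bholi"), ("type", "story")],
  [("id", "fp_10"), ("name", "The Book That Saved the Earth"), ("type", "story")]]

-- one 'for ch in …: if ch["id"] == chapter_id: return {**ch, "book": book}' loop of A
def pvScanA (book : String) (chapter_id : String) : List (List (String × String)) → Option (List (String × String))
  | [] => none
  | ch :: rest =>
      if ch.lookup "id" == some chapter_id then some (ch ++ [("book", book)])
      else pvScanA book chapter_id rest

def get_chapter_info (chapter_id : String) : Option (List (String × String)) :=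
  match pvScanA "First Flight" chapter_id pvProse with
  | some r => some r
  | none =>
    match pvScanA "First Flight" chapter_id pvPoetry with
    | some r => some r
    | none =>
      match pvScanA "Footprints Without Feet" chapter_id pvFootprints with
      | some r => some r
      | none => none

-- ===== PORT B =====
-- Source B's per-family name lists
def pvPoetryNames : List String :=
  ["Dust of Snow & Fire and Ice", "A Tiger in the Zoo",
   "How to Tell Wild Animals & The Ball Poem", "Amanda!",
   "Animals & The Trees", "Fog & The Tale of Custard the Dragon",
   "For Anne Gregory"]

def pvProseNames : List String :=
  ["A Letter to God", "Nelson Mandela: Long Walk to Freedom",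
   "Two Stories about Flying", "From the Diary of Anne Frank",
   "Glimpses of India", "Mijbil the Otter", "Madam Rides the Bus",
   "The Sermon at Benares", "The Proposal"]

def pvStoryNames : List String :=
  ["A Triumph of Surgery", "The Thief's Story", "The Midnight Visitor",
   "A Question of Trust", "Footprints Without Feet",
   "The Making of a Scientist", "The Necklace", "The Hack Driver",
   "Bholi", "The Book That Saved the Earth"]

-- inner 'for i, name in enumerate(names): if suffix == str(i + 1): return {…}'
def pvNameScan (chapter_id suffix typ book : String) : List String → Nat → Option (List (String × String))
  | [], _ => none
  | name :: rest, i =>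
      if suffix == PySem.Int.toStr ((i : Int) + 1) then
        some [("id", chapter_id), ("name", name), ("type", typ), ("book", book)]
      else pvNameScan chapter_id suffix typ book rest (i + 1)

-- one iteration of Source B's outer loop over _FAMILIES
def pvFamily (chapter_id pre typ book : String) (names : List String) : Option (List (String × String)) :=
  if PySem.Str.startswith chapter_id pre then
    pvNameScan chapter_id (PySem.Str.slice chapter_id (some (PySem.Str.len pre)) none) typ book names 0
  else none

def get_chapter_info_alt (chapter_id : String) : Option (List (String × String)) :=
  match pvFamily chapter_id "ff_po" "poetry" "First Flight" pvPoetryNames with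
  | some r => some r
  | none =>
    match pvFamily chapter_id "ff_p" "prose" "First Flight" pvProseNames with
    | some r => some r
    | none =>
      match pvFamily chapter_id "fp_" "story" "Footprints Without Feet" pvStoryNames with
      | some r => some r
      | none => none

-- ===== PRECONDITION & SPEC =====
def Spec_get_chapter_info (chapter_id : String) (out : Option (List (String × String))) : Prop := out = get_chapter_info_alt chapter_id
instance (chapter_id : String) (out : Option (List (String × String))) : Decidable (Spec_get_chapter_info chapter_id out) := by unfold Spec_get_chapter_info; infer_instance

-- ===== CLAIM =====
def Claim_equal_get_chapter_info : Prop := ∀ (chapter_id : String), Dom_get_chapter_info chapter_id → Spec_get_chapter_info chapter_id (get_chapter_info chapter_id)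

-- ===== LEMMAS AND PROOFS =====

theorem pvNameScan_eq_none (chapter_id suffix typ book : String) :
    ∀ (names : List String) (i : Nat),
      (∀ j, j < names.length → suffix ≠ PySem.Int.toStr (((i + j : Nat) : Int) + 1)) →
      pvNameScan chapter_id suffix typ book names i = none := by
  intro names
  induction names with
  | nil => intro i _; rfl
  | cons name rest ih =>
      intro i h
      have h0 : suffix ≠ PySem.Int.toStr ((i : Int) + 1) := by
        have := h 0 (by simp)
        simpa using this
      simp only [pvNameScan, beq_eq_false_iff_ne.mpr h0, Bool.false_eq_true, if_false]
      apply ih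
      intro j hj
      have := h (j + 1) (by simpa using hj)
      have hc : (((i + (j + 1) : Nat) : Int)) = (((i + 1 + j : Nat) : Int)) := by push_cast; ring
      rwa [hc] at this

theorem pvFamily_eq_none (chapter_id pre typ book : String) (names : List String)
    (h : ∀ j, j < names.length →
      chapter_id ≠ String.ofList (pre.toList ++ (PySem.Int.toStr ((j : Nat) + 1 : Int)).toList)) :
    pvFamily chapter_id pre typ book names = none := by
  unfold pvFamily
  by_cases hs : PySem.Str.startswith chapter_id pre = true
  · rw [if_pos hs]
    rw [PySem.Str.startswith_eq, PySem.Chars.startswith_iff] at hs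
    obtain ⟨t, ht⟩ := hs
    apply pvNameScan_eq_none
    intro j hj heq
    -- the suffix equals str(j+1), so chapter_id is exactly pre ++ str(j+1)
    have hsuf : (PySem.Str.slice chapter_id (some (PySem.Str.len pre)) none).toList = t := by
      rw [PySem.Str.toList_slice, PySem.Chars.slice_eq_listSlice, PySem.Str.len_eq,
        PySem.List.slice_from_natCast, ← ht, List.drop_left]
    have hid : chapter_id.toList = pre.toList ++ (PySem.Int.toStr ((j : Nat) + 1 : Int)).toList := by
      rw [← ht, ← hsuf, heq]
      norm_num
    apply h j hj
    apply String.toList_inj.mp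
    rw [hid]
    simp [String.ofList_toList]
  · rw [if_neg hs]

-- ===== VERDICT =====
theorem get_chapter_info_spec : Claim_equal_get_chapter_info := by
  intro chapter_id _
  unfold Spec_get_chapter_info
  by_cases h0 : chapter_id = "ff_p1";   · subst h0; rfl
  by_cases h1 : chapter_id = "ff_p2";   · subst h1; rfl
  by_cases h2 : chapter_id = "ff_p3";   · subst h2; rfl
  by_cases h3 : chapter_id = "ff_p4";   · subst h3; rfl
  by_cases h4 : chapter_id = "ff_p5";   · subst h4; rfl
  by_cases h5 : chapter_id = "ff_p6";   · subst h5; rfl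
  by_cases h6 : chapter_id = "ff_p7";   · subst h6; rfl
  by_cases h7 : chapter_id = "ff_p8";   · subst h7; rfl
  by_cases h8 : chapter_id = "ff_p9";   · subst h8; rfl
  by_cases h9 : chapter_id = "ff_po1";  · subst h9; rfl
  by_cases h10 : chapter_id = "ff_po2"; · subst h10; rfl
  by_cases h11 : chapter_id = "ff_po3"; · subst h11; rfl
  by_cases h12 : chapter_id = "ff_po4"; · subst h12; rfl
  by_cases h13 : chapter_id = "ff_po5"; · subst h13; rfl
  by_cases h14 : chapter_id = "ff_po6"; · subst h14; rfl
  by_cases h15 : chapter_id = "ff_po7"; · subst h15; rfl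
  by_cases h16 : chapter_id = "fp_1";   · subst h16; rfl
  by_cases h17 : chapter_id = "fp_2";   · subst h17; rfl
  by_cases h18 : chapter_id = "fp_3";   · subst h18; rfl
  by_cases h19 : chapter_id = "fp_4";   · subst h19; rfl
  by_cases h20 : chapter_id = "fp_5";   · subst h20; rfl
  by_cases h21 : chapter_id = "fp_6";   · subst h21; rfl
  by_cases h22 : chapter_id = "fp_7";   · subst h22; rfl
  by_cases h23 : chapter_id = "fp_8";   · subst h23; rfl
  by_cases h24 : chapter_id = "fp_9";   · subst h24; rfl
  by_cases h25 : chapter_id = "fp_10";  · subst h25; rfl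
  -- chapter_id matches no chapter id: both sides are none
  have hPo : pvFamily chapter_id "ff_po" "poetry" "First Flight" pvPoetryNames = none := by
    apply pvFamily_eq_none
    intro j hj
    simp only [pvPoetryNames, List.length] at hj
    interval_cases j <;>
      first
      | exact fun heq => h9 (heq.trans (by decide))
      | exact fun heq => h10 (heq.trans (by decide))
      | exact fun heq => h11 (heq.trans (by decide))
      | exact fun heq => h12 (heq.trans (by decide))
      | exact fun heq => h13 (heq.trans (by decide))
      | exact fun heq => h14 (heq.trans (by decide))
      | exact fun heq => h15 (heq.trans (by decide))
  have hPr : pvFamily chapter_id "ff_p" "prose" "First Flight" pvProseNames = none := by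
    apply pvFamily_eq_none
    intro j hj
    simp only [pvProseNames, List.length] at hj
    interval_cases j <;>
      first
      | exact fun heq => h0 (heq.trans (by decide))
      | exact fun heq => h1 (heq.trans (by decide))
      | exact fun heq => h2 (heq.trans (by decide))
      | exact fun heq => h3 (heq.trans (by decide))
      | exact fun heq => h4 (heq.trans (by decide))
      | exact fun heq => h5 (heq.trans (by decide))
      | exact fun heq => h6 (heq.trans (by decide))
      | exact fun heq => h7 (heq.trans (by decide))
      | exact fun heq => h8 (heq.trans (by decide))
  have hFp : pvFamily chapter_id "fp_" "story" "Footprints Without Feet" pvStoryNames = none := by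
    apply pvFamily_eq_none
    intro j hj
    simp only [pvStoryNames, List.length] at hj
    interval_cases j <;>
      first
      | exact fun heq => h16 (heq.trans (by decide))
      | exact fun heq => h17 (heq.trans (by decide))
      | exact fun heq => h18 (heq.trans (by decide))
      | exact fun heq => h19 (heq.trans (by decide))
      | exact fun heq => h20 (heq.trans (by decide))
      | exact fun heq => h21 (heq.trans (by decide))
      | exact fun heq => h22 (heq.trans (by decide))
      | exact fun heq => h23 (heq.trans (by decide))
      | exact fun heq => h24 (heq.trans (by decide))
      | exact fun heq => h25 (heq.trans (by decide))
  have hA : get_chapter_info chapter_id = none := by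
    simp only [get_chapter_info, pvScanA, pvProse, pvPoetry, pvFootprints, List.lookup]
    simp [Ne.symm h0, Ne.symm h1, Ne.symm h2, Ne.symm h3, Ne.symm h4, Ne.symm h5, Ne.symm h6,
      Ne.symm h7, Ne.symm h8, Ne.symm h9, Ne.symm h10, Ne.symm h11, Ne.symm h12, Ne.symm h13,
      Ne.symm h14, Ne.symm h15, Ne.symm h16, Ne.symm h17, Ne.symm h18, Ne.symm h19, Ne.symm h20,
      Ne.symm h21, Ne.symm h22, Ne.symm h23, Ne.symm h24, Ne.symm h25]
  rw [hA]
  simp only [get_chapter_info_alt, hPo, hPr, hFp]
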